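-- pv_equiv track=rewrite | github.com/guilhermebaos/Advent-of-Code-Solutions | 2022/Day6/Day6-Prob1.py | solution_day6_prob1
-- ===== SOURCE A (Python) =====
-- def solution_day6_prob1(puzzle_in: list):
--     char_list = []
--
--     # Process each line
--     for item in puzzle_in:
--         char_num = 0
--         for i in range(len(item) - 3):
--
--             # See if four sequential characters are different
--             if len(set(item[i:i+4])) == 4:
--                 char_num = i + 4
--                 break
--         char_list += [char_num]
--     return char_list
-- ===== SOURCE B (Python) =====
-- def solution_day6_prob1(puzzle_in: list):
--     result = []
--     for line in puzzle_in:
--         # sliding window of distinct chars: last_seen maps char -> latest index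
--         last_seen = {}
--         left = 0
--         marker = 0
--         for right, c in enumerate(line):
--             p = last_seen.get(c, -1)
--             if p >= left:
--                 left = p + 1
--             last_seen[c] = right
--             if right - left + 1 == 4:
--                 marker = right + 1
--                 break
--         result.append(marker)
--     return result
-- ===== Notes on version B (the rewrite author's own statement) =====
-- stated objective: alternative
-- what changed: Replaces the per-position slice+set rescan (building a fresh 4-char set at every index) with a single-pass two-pointer sliding window keeping a last-seen index per character; trades repeated slicing for dict bookkeeping at similar measured cost.
import Mathlib
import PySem

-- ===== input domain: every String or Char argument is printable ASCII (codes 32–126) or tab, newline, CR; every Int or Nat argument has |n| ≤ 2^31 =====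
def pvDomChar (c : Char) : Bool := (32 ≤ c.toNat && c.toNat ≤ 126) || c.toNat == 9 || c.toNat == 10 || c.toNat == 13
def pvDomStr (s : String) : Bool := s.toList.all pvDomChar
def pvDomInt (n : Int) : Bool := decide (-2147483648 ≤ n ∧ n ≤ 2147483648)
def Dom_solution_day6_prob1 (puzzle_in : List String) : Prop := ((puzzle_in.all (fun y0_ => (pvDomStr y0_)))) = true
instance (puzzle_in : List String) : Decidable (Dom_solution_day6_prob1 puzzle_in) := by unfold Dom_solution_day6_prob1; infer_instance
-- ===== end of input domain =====

-- B replaces A's slice-and-set rescan at every index by a one-pass two-pointer sliding window with a last-seen map (objective: alternative algorithm, same measured cost).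

-- ===== PORT A =====
-- inner loop of A: for i in range(len(item)-3): if len(set(item[i:i+4])) == 4: return i+4 (break); else 0
def aScan (cs : List Char) : List Int → Int
  | [] => 0
  | i :: rest =>
    if (PySem.Set.ofList (PySem.List.slice cs (some i) (some (i + 4)))).length = 4 then i + 4
    else aScan cs rest

def solution_day6_prob1 (puzzle_in : List String) : List Int :=
  puzzle_in.foldl
    (fun char_list item =>
      char_list ++ [aScan item.toList (PySem.List.pyRange 0 (PySem.Str.len item - 3) 1)]) []

-- ===== PORT B =====
-- inner loop of B: right/left pointers and a last_seen dict; returns right+1 at the first 4-wide distinct window, else 0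
def bLine : List Char → Int → Int → PySem.Dict Char Int → Int
  | [], _, _, _ => 0
  | c :: rest, right, left, last_seen =>
    let p := last_seen.getD c (-1)
    let left' := if p ≥ left then p + 1 else left
    let last_seen' := last_seen.insert c right
    if right - left' + 1 = 4 then right + 1 else bLine rest (right + 1) left' last_seen'

def solution_day6_prob1_alt (puzzle_in : List String) : List Int :=
  puzzle_in.foldl
    (fun result line => result ++ [bLine line.toList 0 0 PySem.Dict.empty]) []

-- ===== PRECONDITION & SPEC =====
def Spec_solution_day6_prob1 (puzzle_in : List String) (out : List Int) : Prop := out = solution_day6_prob1_alt puzzle_in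
instance (puzzle_in : List String) (out : List Int) : Decidable (Spec_solution_day6_prob1 puzzle_in out) := by unfold Spec_solution_day6_prob1; infer_instance

-- ===== CLAIM (what is proved, stated in full; the proofs are below) =====
def Claim_equal_solution_day6_prob1 : Prop := ∀ (puzzle_in : List String), Dom_solution_day6_prob1 puzzle_in → Spec_solution_day6_prob1 puzzle_in (solution_day6_prob1 puzzle_in)

-- ===== LEMMAS AND PROOFS =====

-- reference form: first window index i (from start) with 4 distinct chars, as A's early-exit loop computes it
def aGo (cs : List Char) (i : Nat) : Int :=
  if _h : i + 4 ≤ cs.length then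
    if ((cs.drop i).take 4).Nodup then (i : Int) + 4 else aGo cs (i + 1)
  else 0
termination_by cs.length - i

-- PySem.Set.ofList length characterises Nodup
theorem len_ofList_eq_iff (l : List Char) : (PySem.Set.ofList l).length = l.length ↔ l.Nodup := by
  induction l using List.reverseRecOn with
  | nil => simp
  | append_singleton l x ih =>
    rw [PySem.Set.ofList_append_singleton]
    by_cases hx : x ∈ l
    · rw [PySem.Set.add_of_mem (by simpa [PySem.Set.mem_ofList] using hx)]
      have h1 := PySem.Set.length_ofList_le (xs := l)
      simp only [List.length_append, List.length_singleton]
      constructor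
      · intro h; omega
      · intro h; exact absurd hx (by simp [List.nodup_append] at h; tauto)
    · rw [PySem.Set.add_of_not_mem (by simpa [PySem.Set.mem_ofList] using hx)]
      simp only [List.length_append, List.length_singleton, List.nodup_append]
      constructor
      · intro h
        refine ⟨ih.mp (by omega), by simp, ?_⟩
        intro a ha b hb
        simp only [List.mem_singleton] at hb
        subst hb
        exact fun h => hx (h ▸ ha)
      · intro ⟨h1, _, _⟩; have := ih.mpr h1; omega

theorem aScan_eq_aGo (cs : List Char) (i : Nat) :
    aScan cs (PySem.List.pyRange (i : Int) ((cs.length : Int) - 3) 1) = aGo cs i := by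
  fun_induction aGo cs i with
  | case1 i h hn =>
    -- in-range, window distinct: both return i + 4
    have hib : (i : Int) < (cs.length : Int) - 3 := by omega
    rw [PySem.List.pyRange_one_cons hib]
    simp only [aScan]
    have hc4 : ((i : Int) + 4) = ((i + 4 : Nat) : Int) := by push_cast; ring
    rw [hc4, PySem.List.slice_natCast]
    have h4 : i + 4 - i = 4 := by omega
    rw [h4]
    have hw4 : ((cs.drop i).take 4).length = 4 := by
      simp only [List.length_take, List.length_drop]; omega
    have hiff := len_ofList_eq_iff ((cs.drop i).take 4)
    rw [hw4] at hiff
    rw [if_pos (hiff.mpr hn)]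
  | case2 i h hn ih =>
    have hib : (i : Int) < (cs.length : Int) - 3 := by omega
    rw [PySem.List.pyRange_one_cons hib]
    simp only [aScan]
    have hc4 : ((i : Int) + 4) = ((i + 4 : Nat) : Int) := by push_cast; ring
    rw [hc4, PySem.List.slice_natCast]
    have h4 : i + 4 - i = 4 := by omega
    rw [h4]
    have hw4 : ((cs.drop i).take 4).length = 4 := by
      simp only [List.length_take, List.length_drop]; omega
    have hiff := len_ofList_eq_iff ((cs.drop i).take 4)
    rw [hw4] at hiff
    rw [if_neg (fun hl => hn (hiff.mp hl))]
    have hc1 : ((i : Int) + 1) = ((i + 1 : Nat) : Int) := by push_cast; ring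
    rw [hc1]
    exact ih
  | case3 i h =>
    rw [PySem.List.pyRange_one_eq_nil (by omega)]
    rfl

-- index (as Int) of the last occurrence of c in the list, -1 if absent
def lastIdx : List Char → Char → Int
  | [], _ => -1
  | a :: rest, c =>
    let t := lastIdx rest c
    if 0 ≤ t then t + 1 else if a = c then 0 else -1

theorem lastIdx_snoc (pre : List Char) (x c : Char) :
    lastIdx (pre ++ [x]) c = if c = x then (pre.length : Int) else lastIdx pre c := by
  induction pre with
  | nil =>
    simp only [List.nil_append, lastIdx, List.length_nil]
    split_ifs with h1 h2 h3 <;> simp_all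
  | cons a pre ih =>
    simp only [List.cons_append, lastIdx, ih]
    by_cases hcx : c = x
    · have hlen : (0:Int) ≤ (pre.length : Int) := by positivity
      simp [hcx, hlen]
    · simp [hcx]

theorem lastIdx_lt (pre : List Char) (c : Char) : lastIdx pre c < pre.length := by
  induction pre with
  | nil => simp [lastIdx]
  | cons a pre ih =>
    simp only [lastIdx, List.length_cons]
    split_ifs <;> push_cast <;> omega

theorem neg_one_le_lastIdx (pre : List Char) (c : Char) : -1 ≤ lastIdx pre c := by
  induction pre with
  | nil => simp [lastIdx]
  | cons a pre ih =>
    simp only [lastIdx]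
    split_ifs <;> omega

theorem lastIdx_getD (pre : List Char) (c : Char) (h : 0 ≤ lastIdx pre c) :
    pre.getD (lastIdx pre c).toNat 'a' = c := by
  induction pre with
  | nil => simp [lastIdx] at h
  | cons a pre ih =>
    simp only [lastIdx] at h ⊢
    split_ifs with h1 h2
    · have ht : (lastIdx pre c + 1).toNat = (lastIdx pre c).toNat + 1 := by omega
      rw [ht]
      simpa using ih h1
    · simp [h2]
    · simp [h1, h2] at h

theorem lastIdx_not_mem_drop (pre : List Char) (c : Char) :
    c ∉ pre.drop (lastIdx pre c + 1).toNat := by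
  induction pre with
  | nil => simp
  | cons a pre ih =>
    simp only [lastIdx]
    split_ifs with h1 h2
    · have ht : (lastIdx pre c + 1 + 1).toNat = (lastIdx pre c + 1).toNat + 1 := by omega
      rw [ht, List.drop_succ_cons]
      exact ih
    · have h3 := neg_one_le_lastIdx pre c
      have ht : (lastIdx pre c : Int) = -1 := by omega
      have ht0 : ((0:Int) + 1).toNat = 1 := by omega
      rw [ht0, List.drop_succ_cons]
      have := ih
      rw [ht] at this
      simpa using this
    · have h3 := neg_one_le_lastIdx pre c
      have ht : (lastIdx pre c : Int) = -1 := by omega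
      have ht0 : ((-1:Int) + 1).toNat = 0 := by omega
      rw [ht0, List.drop_zero]
      have := ih
      rw [ht] at this
      simp only [ht0, List.drop_zero] at this
      simp only [List.mem_cons, not_or]
      exact ⟨fun hc => h2 hc.symm, this⟩

-- invariant of B's loop state after consuming `pre`
def BInv (pre : List Char) (left : Int) (seen : PySem.Dict Char Int) : Prop :=
  0 ≤ left ∧ left ≤ pre.length ∧ (pre.length : Int) - left ≤ 3 ∧
  (∀ c, seen.getD c (-1) = lastIdx pre c) ∧
  (pre.drop left.toNat).Nodup ∧
  (0 < left → pre.getD (left.toNat - 1) 'a' ∈ pre.drop left.toNat)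

theorem bLine_eq_aGo (rest pre : List Char) (left : Int) (seen : PySem.Dict Char Int)
    (h : BInv pre left seen) :
    bLine rest (pre.length : Int) left seen = aGo (pre ++ rest) (pre.length - 3) := by
  induction rest generalizing pre left seen with
  | nil =>
    simp only [bLine, List.append_nil]
    rw [aGo, dif_neg (by omega)]
  | cons c rest' ih =>
    obtain ⟨hl0, hlle, hwin, hseen, hnd, hi4⟩ := h
    simp only [bLine, hseen c, ge_iff_le]
    set t := lastIdx pre c with htdef
    have hplt : t < (pre.length : Int) := lastIdx_lt pre c
    have hpge : -1 ≤ t := neg_one_le_lastIdx pre c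
    set L : Int := if left ≤ t then t + 1 else left with hLdef
    have hL0 : left ≤ L := by rw [hLdef]; split_ifs <;> omega
    have hLpos : 0 ≤ L := le_trans hl0 hL0
    have hLr : L ≤ (pre.length : Int) := by rw [hLdef]; split_ifs <;> omega
    -- the new window (after appending c) is duplicate-free, and its head witness
    have hdropA : ∀ n : Nat, n ≤ pre.length → (pre ++ [c]).drop n = pre.drop n ++ [c] :=
      fun n hn => List.drop_append_of_le_length hn
    have key : (pre.drop L.toNat).Nodup ∧ c ∉ pre.drop L.toNat := by
      by_cases hcase : left ≤ t
      · have hLt : L = t + 1 := by rw [hLdef, if_pos hcase]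
        have h0t : 0 ≤ t := le_trans hl0 hcase
        have hmem := lastIdx_not_mem_drop pre c
        rw [← htdef] at hmem
        have hLtoNat : L.toNat = (t + 1).toNat := by rw [hLt]
        constructor
        · have hdd : pre.drop L.toNat = (pre.drop left.toNat).drop (L.toNat - left.toNat) := by
            rw [List.drop_drop]; congr 1; omega
          rw [hdd]
          exact (List.drop_sublist _ _).nodup hnd
        · rw [hLtoNat]; exact hmem
      · have hLt : L = left := by rw [hLdef, if_neg hcase]
        refine ⟨hLt ▸ hnd, ?_⟩
        intro hmemc
        have hle : (t + 1).toNat ≤ L.toNat := by omega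
        have hdd : pre.drop L.toNat = (pre.drop (t + 1).toNat).drop (L.toNat - (t + 1).toNat) := by
          rw [List.drop_drop]; congr 1; omega
        rw [hdd] at hmemc
        exact (lastIdx_not_mem_drop pre c) (List.mem_of_mem_drop hmemc)
    have hnd' : ((pre ++ [c]).drop L.toNat).Nodup := by
      rw [hdropA L.toNat (by omega), List.nodup_append]
      refine ⟨key.1, List.nodup_singleton c, ?_⟩
      intro a ha b hb
      simp only [List.mem_singleton] at hb
      subst hb
      exact fun he => key.2 (he ▸ ha)
    have hi4' : 0 < L → (pre ++ [c]).getD (L.toNat - 1) 'a' ∈ (pre ++ [c]).drop L.toNat := by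
      intro h0L
      rw [hdropA L.toNat (by omega)]
      by_cases hcase : left ≤ t
      · have hLt : L = t + 1 := by rw [hLdef, if_pos hcase]
        have h0t : 0 ≤ t := le_trans hl0 hcase
        have hidx : L.toNat - 1 = t.toNat := by omega
        rw [hidx, List.getD_append _ _ _ _ (by omega)]
        have := lastIdx_getD pre c (by omega)
        rw [← htdef] at this
        rw [this]
        exact List.mem_append_right _ (List.mem_singleton.mpr rfl)
      · have hLt : L = left := by rw [hLdef, if_neg hcase]
        have h0left : 0 < left := by omega
        rw [List.getD_append _ _ _ _ (by omega)]
        exact List.mem_append_left _ (hLt ▸ hi4 h0left)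
    have hseen' : ∀ c', (seen.insert c (pre.length : Int)).getD c' (-1) = lastIdx (pre ++ [c]) c' := by
      intro c'
      rw [PySem.Dict.getD_insert, lastIdx_snoc]
      by_cases hcc : c' = c
      · simp [hcc]
      · simp [hcc, hseen c']
    by_cases hhit : (pre.length : Int) - L + 1 = 4
    · rw [if_pos hhit]
      have hr3 : 3 ≤ pre.length := by omega
      have hLval : L.toNat = pre.length - 3 := by omega
      have hcs : pre ++ c :: rest' = (pre ++ [c]) ++ rest' := by simp
      rw [aGo, dif_pos (by simp only [List.length_append, List.length_cons]; omega)]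
      have hwindow : ((pre ++ c :: rest').drop (pre.length - 3)).take 4 = (pre ++ [c]).drop (pre.length - 3) := by
        rw [hcs, List.drop_append_of_le_length (by simp only [List.length_append, List.length_singleton]; omega)]
        exact List.take_left' (by simp only [List.length_drop, List.length_append, List.length_singleton]; omega)
      rw [hwindow, if_pos (hLval ▸ hnd')]
      omega
    · rw [if_neg hhit]
      have hinv : BInv (pre ++ [c]) L (seen.insert c (pre.length : Int)) := by
        refine ⟨hLpos, ?_, ?_, hseen', hnd', hi4'⟩
        · simp only [List.length_append, List.length_singleton]; push_cast; omega
        · simp only [List.length_append, List.length_singleton]; push_cast; omega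
      have hIH := ih (pre ++ [c]) L (seen.insert c (pre.length : Int)) hinv
      rw [List.length_append, List.length_singleton] at hIH
      push_cast at hIH
      rw [hIH]
      have hcs : pre ++ c :: rest' = (pre ++ [c]) ++ rest' := by simp
      rw [hcs]
      by_cases hr3 : 3 ≤ pre.length
      · have hLlow : (pre.length : Int) - 2 ≤ L := by omega
        have hin : pre.length - 3 + 4 ≤ ((pre ++ [c]) ++ rest').length := by
          simp only [List.length_append, List.length_singleton]; omega
        have hwindow : (((pre ++ [c]) ++ rest').drop (pre.length - 3)).take 4 = (pre ++ [c]).drop (pre.length - 3) := by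
          rw [List.drop_append_of_le_length (by simp only [List.length_append, List.length_singleton]; omega)]
          exact List.take_left' (by simp only [List.length_drop, List.length_append, List.length_singleton]; omega)
        have hlen4 : ((pre ++ [c]).drop (pre.length - 3)).length = 4 := by
          simp only [List.length_drop, List.length_append, List.length_singleton]; omega
        have hdup : ¬ ((pre ++ [c]).drop (pre.length - 3)).Nodup := by
          intro hN
          have h0L : 0 < L := by omega
          have hmem := hi4' h0L
          have hmge : 1 ≤ L.toNat - (pre.length - 3) := by omega
          have hmle : L.toNat - (pre.length - 3) ≤ 3 := by omega
          have hdd : (pre ++ [c]).drop L.toNat = ((pre ++ [c]).drop (pre.length - 3)).drop (L.toNat - (pre.length - 3)) := by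
            rw [List.drop_drop]; congr 1; omega
          rw [hdd] at hmem
          have hm1' : L.toNat - 1 < (pre ++ [c]).length := by
            simp only [List.length_append, List.length_singleton]; omega
          rw [List.getD_eq_getElem _ _ hm1'] at hmem
          obtain ⟨j, hj, hje⟩ := List.mem_iff_getElem.mp hmem
          rw [List.getElem_drop] at hje
          have hje2 : ((pre ++ [c]).drop (pre.length - 3))[L.toNat - (pre.length - 3) - 1]'(by omega) = (pre ++ [c])[L.toNat - 1]'hm1' := by
            rw [List.getElem_drop]
            exact getElem_congr rfl (by omega) (by simp only [List.length_append, List.length_singleton]; omega)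
          have hje3 := hje.trans hje2.symm
          have := (List.Nodup.getElem_inj_iff hN).mp hje3
          omega
        have hstepEq : aGo ((pre ++ [c]) ++ rest') (pre.length - 3) = aGo ((pre ++ [c]) ++ rest') (pre.length - 2) := by
          rw [aGo, dif_pos hin, hwindow, if_neg hdup]
          congr 1
          omega
        rw [← hstepEq]
      · have h0 : pre.length - 2 = pre.length - 3 := by omega
        rw [h0]

theorem line_eq (s : String) :
    aScan s.toList (PySem.List.pyRange 0 (PySem.Str.len s - 3) 1) = bLine s.toList 0 0 PySem.Dict.empty := by
  have hA := aScan_eq_aGo s.toList 0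
  have hB := bLine_eq_aGo s.toList [] 0 PySem.Dict.empty
    (by
      refine ⟨le_refl 0, by simp, by simp, ?_, by simp, by simp⟩
      intro c
      simp [PySem.Dict.getD_empty, lastIdx])
  simp only [List.length_nil, Nat.cast_zero, List.nil_append, Nat.zero_sub] at hB
  rw [PySem.Str.len_eq]
  simp only [Nat.cast_zero] at hA
  rw [hA, hB]

theorem foldl_lines (l : List String) (acc : List Int) :
    l.foldl (fun cl it => cl ++ [aScan it.toList (PySem.List.pyRange 0 (PySem.Str.len it - 3) 1)]) acc
      = l.foldl (fun r it => r ++ [bLine it.toList 0 0 PySem.Dict.empty]) acc := by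
  induction l generalizing acc with
  | nil => rfl
  | cons x xs ih => rw [List.foldl_cons, List.foldl_cons, line_eq, ih]

-- ===== VERDICT (by name: the statement is the Claim_ definition above) =====
theorem solution_day6_prob1_spec : Claim_equal_solution_day6_prob1 := by
  intro puzzle_in _
  unfold Spec_solution_day6_prob1 solution_day6_prob1 solution_day6_prob1_alt
  exact foldl_lines puzzle_in []
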